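-- pv_equiv track=rewrite | github.com/LearningnRunning/Algorithm | 2354-number-of-excellent-pairs/2354-number-of-excellent-pairs.py | countExcellentPairs
-- ===== SOURCE A (Python) =====
-- from typing import List
--
-- from collections import Counter
--
-- def countExcellentPairs(nums: List[int], k: int) -> int:
--     # Create a counter to store the count of set bits for each unique number in the array.
--     count = Counter(map(int.bit_count, set(nums)))
--
--     # Initialize the result variable to store the count of excellent pairs.
--     result = 0
--
--     # Iterate through all possible pairs of set bit counts and calculate the number of excellent pairs.
--     for i in count:
--         for j in count:
--             if i + j >= k:
--                 result += count[i] * count[j]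
--
--     return result
-- ===== SOURCE B (Python) =====
-- def countExcellentPairs(nums, k):
--     # Frequency table over bit counts 0..32 plus suffix counts, instead of a
--     # Counter and a double loop over its keys.
--     MAXB = 32
--     bits = [v.bit_count() for v in set(nums)]
--     freq = [bits.count(b) for b in range(MAXB + 1)]
--     suf = [sum(freq[t:]) for t in range(MAXB + 2)]
--     res = 0
--     for i in range(MAXB + 1):
--         t = min(max(k - i, 0), MAXB + 1)
--         res += freq[i] * suf[t]
--     return res
-- ===== Notes on version B (the rewrite author's own statement) =====
-- stated objective: alternative
-- what changed: Replaces the Counter-of-popcounts and its double loop over key pairs by a fixed-size frequency table over bit counts 0..32 plus a suffix-count table, combining each bucket with the clamped threshold k-i in a single pass.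
import Mathlib
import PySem

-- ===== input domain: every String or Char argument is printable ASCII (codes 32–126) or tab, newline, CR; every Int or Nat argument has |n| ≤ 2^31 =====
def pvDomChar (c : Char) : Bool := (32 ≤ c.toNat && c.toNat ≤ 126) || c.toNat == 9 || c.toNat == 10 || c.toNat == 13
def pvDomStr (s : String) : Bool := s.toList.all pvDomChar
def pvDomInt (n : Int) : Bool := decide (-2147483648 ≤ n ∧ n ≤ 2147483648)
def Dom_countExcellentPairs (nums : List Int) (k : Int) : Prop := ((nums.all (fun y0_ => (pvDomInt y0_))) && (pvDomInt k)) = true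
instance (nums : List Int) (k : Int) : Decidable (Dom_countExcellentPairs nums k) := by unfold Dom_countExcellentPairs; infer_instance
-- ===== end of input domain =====

-- B replaces A's Counter-of-popcounts double key loop by a frequency table over
-- bit counts 0..32 plus a suffix-count table and a single clamped-threshold pass
-- (alternative decomposition; not claimed faster).

-- ===== PORT A =====
def countExcellentPairs (nums : List Int) (k : Int) : Int :=
  -- count = Counter(map(int.bit_count, set(nums)))
  let count := PySem.Dict.counter
    ((PySem.Set.ofList nums).map (fun v => (PySem.Int.bitCount v : Int)))
  -- for i in count: for j in count: if i + j >= k: result += count[i] * count[j]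
  count.keys.foldl (fun result i =>
    count.keys.foldl (fun result j =>
      if k ≤ i + j then result + count.getD i 0 * count.getD j 0 else result)
      result) 0

-- ===== PORT B =====
def countExcellentPairs_alt (nums : List Int) (k : Int) : Int :=
  let MAXB : Int := 32
  let bits := (PySem.Set.ofList nums).map (fun v => (PySem.Int.bitCount v : Int))
  let freq := (PySem.List.pyRange 0 (MAXB + 1) 1).map (fun b => (bits.count b : Int))
  let suf := (PySem.List.pyRange 0 (MAXB + 2) 1).map
    (fun t => (PySem.List.slice freq (some t) none).sum)
  (PySem.List.pyRange 0 (MAXB + 1) 1).foldl (fun res i =>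
    let t := min (max (k - i) 0) (MAXB + 1)
    res + PySem.List.pyGetD freq i 0 * PySem.List.pyGetD suf t 0) 0

-- ===== PRECONDITION & SPEC =====
def Spec_countExcellentPairs (nums : List Int) (k : Int) (out : Int) : Prop := out = countExcellentPairs_alt nums k
instance (nums : List Int) (k : Int) (out : Int) : Decidable (Spec_countExcellentPairs nums k out) := by unfold Spec_countExcellentPairs; infer_instance

-- ===== CLAIM (what is proved, stated in full; the proofs are below) =====
def Claim_equal_countExcellentPairs : Prop := ∀ (nums : List Int) (k : Int), Dom_countExcellentPairs nums k → Spec_countExcellentPairs nums k (countExcellentPairs nums k)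

-- ===== LEMMAS AND PROOFS =====

-- the popcounts of the distinct values of nums (proof-only abbreviation)
def pvBits (nums : List Int) : List Int :=
  (PySem.Set.ofList nums).map (fun v => (PySem.Int.bitCount v : Int))

-- the common reference value: the double sum over all pairs of distinct values
def pvS (nums : List Int) (k : Int) : Int :=
  ((pvBits nums).map (fun x =>
    ((pvBits nums).map (fun y => if k ≤ x + y then (1 : Int) else 0)).sum)).sum

lemma pv_sum_single (f : Int → Int) (x : Int) :
    ∀ (K : List Int), K.Nodup → x ∈ K →
      (K.map (fun i => if i = x then f i else 0)).sum = f x := by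
  intro K
  induction K with
  | nil => intro _ h; simp at h
  | cons a K ih =>
    intro hnd hx
    rcases List.nodup_cons.mp hnd with ⟨ha, hndK⟩
    rcases List.mem_cons.mp hx with rfl | hx
    · have h0 : (K.map (fun i => if i = x then f i else 0)).sum = 0 := by
        apply List.sum_eq_zero
        intro z hz
        rcases List.mem_map.mp hz with ⟨i, hi, rfl⟩
        have hne : i ≠ x := fun h => ha (h ▸ hi)
        simp [hne]
      simp [h0]
    · have hax : a ≠ x := fun h => ha (h ▸ hx)
      simp only [List.map_cons, List.sum_cons, if_neg hax, zero_add]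
      exact ih hndK hx

lemma pv_sum_count_mul (f : Int → Int) (K : List Int) (hK : K.Nodup) :
    ∀ (L : List Int), (∀ y ∈ L, y ∈ K) →
      (K.map (fun i => (L.count i : Int) * f i)).sum = (L.map f).sum := by
  intro L
  induction L with
  | nil => intro _; simp
  | cons x L ih =>
    intro hmem
    have hstep : (K.map (fun i => ((x :: L).count i : Int) * f i))
        = K.map (fun i => ((L.count i : Int) * f i) + (if i = x then f i else 0)) := by
      apply List.map_congr_left
      intro i hi
      have : (x :: L).count i = L.count i + if x == i then 1 else 0 := List.count_cons ..
      rw [this]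
      push_cast
      by_cases h : i = x
      · simp [h]; ring
      · have hxi : ¬ x = i := fun hh => h hh.symm
        simp [h, hxi]
    rw [hstep, PySem.List.sum_map_add_int,
        ih (fun y hy => hmem y (List.mem_cons_of_mem _ hy)),
        pv_sum_single f x K hK (hmem x (List.mem_cons_self ..))]
    simp [add_comm]

lemma pv_foldl_if_add (p : Int → Prop) [DecidablePred p] (g : Int → Int) :
    ∀ (K : List Int) (r : Int),
      K.foldl (fun r j => if p j then r + g j else r) r
        = r + (K.map (fun j => if p j then g j else 0)).sum := by
  intro K
  induction K with
  | nil => intro r; simp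
  | cons a K ih =>
    intro r
    by_cases h : p a <;> simp [List.foldl, h, ih] <;> ring_nf

lemma pv_bc_le32 (v : Int) (h1 : -2147483648 ≤ v) (h2 : v ≤ 2147483648) :
    PySem.Int.bitCount v ≤ 32 := by
  rcases eq_or_ne v 0 with rfl | hv
  · decide
  · have hb := PySem.Int.bitCount_le_bitLength v
    have hl := PySem.Int.two_pow_bitLength_le v hv
    have hna : v.natAbs ≤ 2147483648 := by omega
    by_contra hgt
    have hpow : (2 : Nat) ^ 32 ≤ 2 ^ (PySem.Int.bitLength v - 1) :=
      Nat.pow_le_pow_right (by norm_num) (by omega)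
    have h32 : (2 : Nat) ^ 32 = 4294967296 := by norm_num
    omega

lemma pv_bits_bounds (nums : List Int) (k : Int)
    (h : Dom_countExcellentPairs nums k) :
    ∀ y ∈ pvBits nums, 0 ≤ y ∧ y ≤ 32 := by
  intro y hy
  rcases List.mem_map.mp hy with ⟨v, hv, rfl⟩
  have hvn : v ∈ nums := (PySem.Set.mem_ofList nums v).mp hv
  unfold Dom_countExcellentPairs at h
  simp only [Bool.and_eq_true, List.all_eq_true, pvDomInt, decide_eq_true_eq] at h
  obtain ⟨ha, hb⟩ := h.1 v hvn
  refine ⟨Int.natCast_nonneg _, ?_⟩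
  exact_mod_cast pv_bc_le32 v ha hb

lemma pv_A_eq (nums : List Int) (k : Int) :
    countExcellentPairs nums k = pvS nums k := by
  have hA : countExcellentPairs nums k =
      (PySem.Dict.counter (pvBits nums)).keys.foldl (fun result i =>
        (PySem.Dict.counter (pvBits nums)).keys.foldl (fun result j =>
          if k ≤ i + j then
            result + (PySem.Dict.counter (pvBits nums)).getD i 0
              * (PySem.Dict.counter (pvBits nums)).getD j 0
          else result) result) 0 := rfl
  rw [hA]
  set L := pvBits nums with hLdef
  set C := PySem.Dict.counter L with hCdef
  have hnd : C.keys.Nodup := PySem.Dict.nodup_keys_counter L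
  have hmem : ∀ y ∈ L, y ∈ C.keys := by
    intro y hy
    rw [hCdef, PySem.Dict.keys_counter]
    exact (PySem.Set.mem_ofList L y).mpr hy
  have hcd : ∀ i, C.getD i 0 = (L.count i : Int) := fun i => PySem.Dict.getD_counter L i
  have hinner : ∀ (r i : Int),
      C.keys.foldl (fun r j => if k ≤ i + j then r + C.getD i 0 * C.getD j 0 else r) r
        = r + (C.keys.map (fun j => if k ≤ i + j then C.getD i 0 * C.getD j 0 else 0)).sum :=
    fun r i => pv_foldl_if_add (fun j => k ≤ i + j) (fun j => C.getD i 0 * C.getD j 0) C.keys r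
  simp only [hinner]
  rw [PySem.List.foldl_add, zero_add]
  have houter : C.keys.map (fun i =>
        (C.keys.map (fun j => if k ≤ i + j then C.getD i 0 * C.getD j 0 else 0)).sum)
      = C.keys.map (fun i =>
        (L.count i : Int) * (L.map (fun y => if k ≤ i + y then (1 : Int) else 0)).sum) := by
    apply List.map_congr_left
    intro i hi
    have h1 : C.keys.map (fun j => if k ≤ i + j then C.getD i 0 * C.getD j 0 else 0)
        = C.keys.map (fun j => (L.count j : Int) * (if k ≤ i + j then (L.count i : Int) else 0)) := by
      apply List.map_congr_left
      intro j hj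
      rw [hcd, hcd]
      split_ifs <;> ring
    rw [h1, pv_sum_count_mul _ _ hnd L hmem]
    have h2 : L.map (fun y => if k ≤ i + y then (L.count i : Int) else 0)
        = L.map (fun y => (L.count i : Int) * (if k ≤ i + y then (1 : Int) else 0)) := by
      apply List.map_congr_left
      intro y _
      split_ifs <;> ring
    rw [h2, List.sum_map_mul_left]
  rw [houter, pv_sum_count_mul _ _ hnd L hmem]
  rfl

lemma pv_suffix (L : List Int) (t : Int) (hb : ∀ y ∈ L, 0 ≤ y ∧ y ≤ 32) :
    ((PySem.List.pyRange t 33 1).map (fun b => (L.count b : Int))).sum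
      = (L.map (fun y => if t ≤ y then (1 : Int) else 0)).sum := by
  have hnd : (PySem.List.pyRange t 33 1).Nodup := PySem.List.nodup_pyRange_one t 33
  have h1 : (PySem.List.pyRange t 33 1).map (fun b => (L.count b : Int))
      = (PySem.List.pyRange t 33 1).map
          (fun b => (((L.filter (fun y => decide (t ≤ y))).count b : Int)) * 1) := by
    apply List.map_congr_left
    intro j hj
    have hjt : t ≤ j := (PySem.List.mem_pyRange_one.mp hj).1
    rw [List.count_filter (by simpa using hjt), mul_one]
  rw [h1, pv_sum_count_mul (fun _ => 1) _ hnd]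
  · have hione := PySem.List.sum_map_ite_one_zero (fun y : Int => decide (t ≤ y)) L
    simp only [decide_eq_true_eq] at hione
    simp [hione, List.countP_eq_length_filter]
  · intro y hy
    have := List.mem_filter.mp hy
    have hyL := hb y this.1
    have hty : t ≤ y := by simpa using this.2
    exact PySem.List.mem_pyRange_one.mpr ⟨hty, by omega⟩

lemma pv_B_eq (nums : List Int) (k : Int)
    (hb : ∀ y ∈ pvBits nums, 0 ≤ y ∧ y ≤ 32) :
    countExcellentPairs_alt nums k = pvS nums k := by
  have hB : countExcellentPairs_alt nums k =
      (PySem.List.pyRange 0 33 1).foldl (fun res i =>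
        res + PySem.List.pyGetD
                ((PySem.List.pyRange 0 33 1).map (fun b => ((pvBits nums).count b : Int))) i 0
            * PySem.List.pyGetD
                ((PySem.List.pyRange 0 34 1).map (fun t =>
                  (PySem.List.slice
                    ((PySem.List.pyRange 0 33 1).map (fun b => ((pvBits nums).count b : Int)))
                    (some t) none).sum))
                (min (max (k - i) 0) 33) 0) 0 := by
    norm_num [countExcellentPairs_alt, pvBits]
  rw [hB]
  set L := pvBits nums with hLdef
  set freq := (PySem.List.pyRange 0 33 1).map (fun b => (L.count b : Int)) with hfreq
  rw [PySem.List.foldl_add, zero_add]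
  have hmemR : ∀ y ∈ L, y ∈ PySem.List.pyRange 0 33 1 := by
    intro y hy
    have := hb y hy
    exact PySem.List.mem_pyRange_one.mpr ⟨this.1, by omega⟩
  have hstep : (PySem.List.pyRange 0 33 1).map (fun i =>
        PySem.List.pyGetD freq i 0
          * PySem.List.pyGetD ((PySem.List.pyRange 0 34 1).map (fun t =>
              (PySem.List.slice freq (some t) none).sum)) (min (max (k - i) 0) 33) 0)
      = (PySem.List.pyRange 0 33 1).map (fun i =>
          (L.count i : Int) * (L.map (fun y => if k ≤ i + y then (1 : Int) else 0)).sum) := by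
    apply List.map_congr_left
    intro i hi
    have hiR := PySem.List.mem_pyRange_one.mp hi
    have hgf : PySem.List.pyGetD freq i 0 = (L.count i : Int) := by
      rw [hfreq]
      exact PySem.List.pyGetD_map_pyRange_of_nonneg _ 33 i 0 hiR.1 hiR.2
    set t := min (max (k - i) 0) 33 with htdef
    have ht0 : 0 ≤ t := by omega
    have ht33 : t ≤ 33 := by omega
    have hgs : PySem.List.pyGetD ((PySem.List.pyRange 0 34 1).map (fun t =>
          (PySem.List.slice freq (some t) none).sum)) t 0
        = (PySem.List.slice freq (some t) none).sum :=
      PySem.List.pyGetD_map_pyRange_of_nonneg _ 34 t 0 ht0 (by omega)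
    have hsplit : PySem.List.pyRange 0 33 1
        = PySem.List.pyRange 0 t 1 ++ PySem.List.pyRange t 33 1 :=
      PySem.List.pyRange_one_append 0 t 33 ht0 ht33
    have hdrop : freq.drop t.toNat = (PySem.List.pyRange t 33 1).map (fun b => (L.count b : Int)) := by
      rw [hfreq, hsplit, List.map_append]
      have hlen : ((PySem.List.pyRange 0 t 1).map (fun b => (L.count b : Int))).length = t.toNat := by
        rw [List.length_map, PySem.List.length_pyRange_one]
        omega
      rw [← hlen, List.drop_left]
    have hslice : PySem.List.slice freq (some t) none = freq.drop t.toNat :=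
      PySem.List.slice_from freq ht0
    rw [hgf, hgs, hslice, hdrop, pv_suffix L t hb]
    have hpt : L.map (fun y => if t ≤ y then (1 : Int) else 0)
        = L.map (fun y => if k ≤ i + y then (1 : Int) else 0) := by
      apply List.map_congr_left
      intro y hy
      have hyb := hb y hy
      have : t ≤ y ↔ k ≤ i + y := by omega
      simp [this]
    rw [hpt]
  rw [hstep, pv_sum_count_mul _ _ (PySem.List.nodup_pyRange_one 0 33) L hmemR]
  rfl

-- ===== VERDICT (by name: the statement is the Claim_ definition above) =====
theorem countExcellentPairs_spec : Claim_equal_countExcellentPairs := by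
  intro nums k hDom
  unfold Spec_countExcellentPairs
  rw [pv_A_eq, pv_B_eq nums k (pv_bits_bounds nums k hDom)]
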